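-- pv_equiv track=rewrite | github.com/AzizFaraj/CrowdCoolingDrone | crowdcooling_ai/dataset.py | verify_disjoint_splits
-- ===== SOURCE A (Python) =====
-- from typing import Iterable
--
-- def verify_disjoint_splits(split_to_items: dict[str, Iterable[str]]) -> dict[str, list[str]]:
--     normalized = {name: set(items) for name, items in split_to_items.items()}
--     overlap_report: dict[str, list[str]] = {}
--     split_names = list(normalized)
--     for index, left_name in enumerate(split_names):
--         for right_name in split_names[index + 1 :]:
--             overlap = sorted(normalized[left_name] & normalized[right_name])
--             if overlap:
--                 overlap_report[f"{left_name}__{right_name}"] = overlap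
--     return overlap_report
-- ===== SOURCE B (Python) =====
-- from typing import Iterable
--
-- def verify_disjoint_splits(split_to_items: dict[str, "Iterable[str]"]) -> dict[str, list[str]]:
--     normalized = {name: set(items) for name, items in split_to_items.items()}
--     # invert once: item -> set of splits owning it; sort every split once
--     owners: dict[str, set] = {}
--     ordered: dict[str, list[str]] = {}
--     for name, items in normalized.items():
--         ordered[name] = sorted(items)
--         for item in items:
--             owners.setdefault(item, set()).add(name)
--     report: dict[str, list[str]] = {}
--     names = list(normalized)
--     while names:
--         left = names.pop(0)
--         for right in names:
--             overlap = [item for item in ordered[left] if right in owners[item]]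
--             if overlap:
--                 report[f"{left}__{right}"] = overlap
--     return report
-- ===== Notes on version B (the rewrite author's own statement) =====
-- stated objective: alternative
-- what changed: B builds an item->owning-splits inverted index once and sorts each split once, then computes every pairwise overlap by filtering the pre-sorted left split through that index, instead of A's per-pair set intersection plus per-pair sort.
import Mathlib
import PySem

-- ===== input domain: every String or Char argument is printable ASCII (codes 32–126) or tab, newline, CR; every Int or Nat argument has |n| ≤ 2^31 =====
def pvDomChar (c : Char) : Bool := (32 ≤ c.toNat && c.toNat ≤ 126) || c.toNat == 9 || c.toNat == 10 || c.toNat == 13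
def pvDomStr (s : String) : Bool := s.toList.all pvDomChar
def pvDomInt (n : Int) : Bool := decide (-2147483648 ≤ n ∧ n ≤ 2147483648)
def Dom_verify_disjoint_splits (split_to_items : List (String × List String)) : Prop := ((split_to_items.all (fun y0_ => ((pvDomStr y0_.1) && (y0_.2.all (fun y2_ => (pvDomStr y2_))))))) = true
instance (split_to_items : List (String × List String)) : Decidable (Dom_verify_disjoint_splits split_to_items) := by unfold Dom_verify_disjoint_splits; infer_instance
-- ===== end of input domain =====

-- B replaces A's per-pair set intersections and per-pair sorts by a one-pass item->owners
-- inverted index and one sort per split (objective: alternative algorithm, same results).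

-- ===== PORT A =====
-- shared first line of both Pythons: normalized = {name: set(items) for name, items in split_to_items.items()}
def vdsNormalized (split_to_items : List (String × List String)) : PySem.Dict String (PySem.Set String) :=
  (PySem.Dict.ofList split_to_items).items.foldl
    (fun nd p => nd.insert p.1 (PySem.Set.ofList p.2)) PySem.Dict.empty

def verify_disjoint_splits (split_to_items : List (String × List String)) : List (String × List String) :=
  let normalized := vdsNormalized split_to_items
  let split_names := normalized.keys
  -- for index, left_name in enumerate(split_names): for right_name in split_names[index+1:]:
  ((PySem.List.enumerate split_names).foldl
    (fun report p =>
      (PySem.List.slice split_names (some (p.1 + 1)) none).foldl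
        (fun report right_name =>
          -- left_name/right_name are keys of normalized, so the getD default is never used
          let overlap := PySem.List.sorted
            ((normalized.getD p.2 PySem.Set.empty).inter (normalized.getD right_name PySem.Set.empty))
            (fun x => x) false
          if overlap ≠ [] then report.insert (PySem.Str.join "__" [p.2, right_name]) overlap else report)
        report)
    PySem.Dict.empty).items

-- ===== PORT B =====
-- while names: left = names.pop(0); for right in names: …
def vdsEmit (ordered : PySem.Dict String (List String)) (owners : PySem.Dict String (PySem.Set String)) :
    List String → PySem.Dict String (List String) → PySem.Dict String (List String)
  | [], report => report
  | left :: names, report =>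
      vdsEmit ordered owners names
        (names.foldl
          (fun report right =>
            let overlap := (ordered.getD left []).filter
              (fun item => (owners.getD item PySem.Set.empty).contains right)
            if overlap ≠ [] then report.insert (PySem.Str.join "__" [left, right]) overlap else report)
          report)

def verify_disjoint_splits_alt (split_to_items : List (String × List String)) : List (String × List String) :=
  let normalized := vdsNormalized split_to_items
  let ordered := normalized.items.foldl
    (fun od p => od.insert p.1 (PySem.List.sorted p.2 (fun x => x) false)) PySem.Dict.empty
  let owners := normalized.items.foldl
    (fun w p => p.2.foldl (fun w item => w.modify item PySem.Set.empty (fun so => so.add p.1)) w)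
    PySem.Dict.empty
  (vdsEmit ordered owners normalized.keys PySem.Dict.empty).items

-- ===== PRECONDITION & SPEC =====
def Spec_verify_disjoint_splits (split_to_items : List (String × List String)) (out : List (String × List String)) : Prop := out = verify_disjoint_splits_alt split_to_items
instance (split_to_items : List (String × List String)) (out : List (String × List String)) : Decidable (Spec_verify_disjoint_splits split_to_items out) := by unfold Spec_verify_disjoint_splits; infer_instance

-- ===== CLAIM (what is proved, stated in full; the proofs are below) =====
def Claim_equal_verify_disjoint_splits : Prop := ∀ (split_to_items : List (String × List String)), Dom_verify_disjoint_splits split_to_items → Spec_verify_disjoint_splits split_to_items (verify_disjoint_splits split_to_items)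

-- ===== LEMMAS AND PROOFS =====

-- generic "process each element with the list of elements after it" fold
def pairFold {α β : Type} (f : α → List α → β → β) : List α → β → β
  | [], r => r
  | x :: t, r => pairFold f t (f x t r)

-- A's enumerate+slice double loop is pairFold
theorem enum_slice_foldl_eq_pairFold {α β : Type} (f : α → List α → β → β) :
    ∀ (t pre : List α) (r : β),
      (PySem.List.enumerate t ((pre.length : Int))).foldl
        (fun acc p => f p.2 (PySem.List.slice (pre ++ t) (some (p.1 + 1)) none) acc) r
      = pairFold f t r := by
  intro t
  induction t with
  | nil => intro pre r; simp [PySem.List.enumerate, pairFold]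
  | cons x t ih =>
    intro pre r
    have hcons : PySem.List.enumerate (x :: t) ((pre.length : Int)) =
        ((pre.length : Int), x) :: PySem.List.enumerate t ((pre.length : Int) + 1) := rfl
    rw [hcons]
    simp only [List.foldl_cons]
    have hslice : PySem.List.slice (pre ++ x :: t) (some ((pre.length : Int) + 1)) none = t := by
      rw [PySem.List.slice_from (pre ++ x :: t) (by omega)]
      have h1 : ((pre.length : Int) + 1).toNat = (pre ++ [x]).length := by
        simp
      have h2 : pre ++ x :: t = (pre ++ [x]) ++ t := by simp
      rw [h1, h2, List.drop_left]
    rw [hslice]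
    have hlen : ((pre.length : Int) + 1) = (((pre ++ [x]).length : Nat) : Int) := by
      simp
    have hl2 : pre ++ x :: t = (pre ++ [x]) ++ t := by simp
    rw [hlen, hl2]
    rw [ih (pre ++ [x]) (f x t r)]
    rfl

theorem pairFold_congr {α β : Type} (f g : α → List α → β → β) :
    ∀ (names : List α) (r : β),
      (∀ x t r', x ∈ names → t.Sublist names → f x t r' = g x t r') →
      pairFold f names r = pairFold g names r := by
  intro names
  induction names with
  | nil => intro r _; rfl
  | cons x t ih =>
    intro r h
    simp only [pairFold]
    rw [h x t r (by simp) (List.sublist_cons_self x t)]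
    exact ih _ (fun y u r' hy hu =>
      h y u r' (List.mem_cons_of_mem _ hy) (hu.trans (List.sublist_cons_self x t)))

theorem vdsEmit_eq_pairFold (ordered : PySem.Dict String (List String))
    (owners : PySem.Dict String (PySem.Set String)) :
    ∀ (names : List String) (report : PySem.Dict String (List String)),
      vdsEmit ordered owners names report =
      pairFold (fun left t rep =>
        t.foldl
          (fun rep right =>
            let overlap := (ordered.getD left []).filter
              (fun item => (owners.getD item PySem.Set.empty).contains right)
            if overlap ≠ [] then rep.insert (PySem.Str.join "__" [left, right]) overlap else rep)
          rep) names report := by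
  intro names
  induction names with
  | nil => intro r; rfl
  | cons x t ih =>
    intro r
    simp only [vdsEmit, pairFold]
    exact ih _

-- items of normalized
theorem vdsNormalized_items (s : List (String × List String)) :
    (vdsNormalized s).items =
      (PySem.Dict.ofList s).items.map (fun p => (p.1, PySem.Set.ofList p.2)) := by
  unfold vdsNormalized
  have h := PySem.Dict.items_foldl_insert_fresh (PySem.Dict.ofList s).items
    (fun p => p.1) (fun p => PySem.Set.ofList p.2) PySem.Dict.empty
    (fun a _ => PySem.Dict.contains_empty _)
    (by simpa [PySem.Dict.keys] using PySem.Dict.nodup_keys_ofList s)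
  simpa using h

theorem vdsNormalized_keys_nodup (s : List (String × List String)) :
    (vdsNormalized s).keys.Nodup := by
  have h : (vdsNormalized s).keys = (PySem.Dict.ofList s).keys := by
    simp [PySem.Dict.keys, vdsNormalized_items, List.map_map, Function.comp]
  rw [h]
  exact PySem.Dict.nodup_keys_ofList s

theorem vdsNormalized_getD_ofList (s : List (String × List String)) {k : String}
    (hk : k ∈ (vdsNormalized s).keys) :
    ∃ xs, (k, PySem.Set.ofList xs) ∈ (vdsNormalized s).items ∧
      (vdsNormalized s).getD k PySem.Set.empty = PySem.Set.ofList xs := by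
  have hnd := vdsNormalized_keys_nodup s
  have hk' : k ∈ (vdsNormalized s).items.map (fun p => p.1) := by
    simpa [PySem.Dict.keys] using hk
  obtain ⟨p, hp, hpk⟩ := List.mem_map.mp hk'
  rw [vdsNormalized_items] at hp
  obtain ⟨q, hq, rfl⟩ := List.mem_map.mp hp
  simp only at hpk
  subst hpk
  refine ⟨q.2, ?_, ?_⟩
  · rw [vdsNormalized_items]; exact List.mem_map.mpr ⟨q, hq, rfl⟩
  · exact PySem.Dict.getD_of_mem_items _
      (by rw [vdsNormalized_items]; exact List.mem_map.mpr ⟨q, hq, rfl⟩) hnd _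

-- inner owners loop
theorem owners_inner (n : String) :
    ∀ (items : List String) (w : PySem.Dict String (PySem.Set String)) (x r : String),
      (r ∈ (items.foldl (fun w it => w.modify it PySem.Set.empty (fun so => so.add n)) w).getD x PySem.Set.empty)
      ↔ r ∈ w.getD x PySem.Set.empty ∨ (x ∈ items ∧ r = n) := by
  intro items
  induction items with
  | nil => intro w x r; simp
  | cons it rest ih =>
    intro w x r
    simp only [List.foldl_cons]
    rw [ih]
    rw [PySem.Dict.getD_modify]
    split_ifs with hx
    · subst hx
      simp only [PySem.Set.mem_add, List.mem_cons]
      tauto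
    · simp only [List.mem_cons]
      constructor
      · rintro (h | ⟨hrest, rfl⟩)
        · tauto
        · tauto
      · rintro (h | ⟨(rfl | hrest), rfl⟩)
        · tauto
        · exact absurd rfl hx
        · tauto

theorem owners_outer :
    ∀ (l : List (String × PySem.Set String)) (w : PySem.Dict String (PySem.Set String)) (x r : String),
      (r ∈ (l.foldl (fun w p => p.2.foldl (fun w it => w.modify it PySem.Set.empty (fun so => so.add p.1)) w) w).getD x PySem.Set.empty)
      ↔ r ∈ w.getD x PySem.Set.empty ∨ ∃ p ∈ l, x ∈ p.2 ∧ r = p.1 := by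
  intro l
  induction l with
  | nil => intro w x r; simp
  | cons p l ih =>
    intro w x r
    simp only [List.foldl_cons]
    rw [ih, owners_inner, List.exists_mem_cons_iff]
    tauto

-- owners lookup = membership in the right split
theorem owners_contains_iff (s : List (String × List String)) (right x : String)
    (hr : right ∈ (vdsNormalized s).keys) :
    ((((vdsNormalized s).items.foldl
        (fun w p => p.2.foldl (fun w item => w.modify item PySem.Set.empty (fun so => so.add p.1)) w)
        PySem.Dict.empty).getD x PySem.Set.empty).contains right = true)
    ↔ x ∈ (vdsNormalized s).getD right PySem.Set.empty := by
  rw [PySem.Set.contains_iff, owners_outer]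
  have hnd := vdsNormalized_keys_nodup s
  constructor
  · rintro (h | ⟨⟨p1, p2⟩, hp, hxp, rfl⟩)
    · simp [PySem.Dict.getD_empty, PySem.Set.empty] at h
    · rw [PySem.Dict.getD_of_mem_items _ hp hnd PySem.Set.empty]
      exact hxp
  · intro hx
    right
    refine ⟨(right, (vdsNormalized s).getD right PySem.Set.empty), ?_, hx, rfl⟩
    rw [PySem.Dict.items_eq_map_keys (vdsNormalized s) hnd PySem.Set.empty]
    exact List.mem_map_of_mem hr

-- ordered lookup = sorted split
theorem ordered_getD (s : List (String × List String)) {k : String}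
    (hk : k ∈ (vdsNormalized s).keys) :
    ((vdsNormalized s).items.foldl
        (fun od p => od.insert p.1 (PySem.List.sorted p.2 (fun x => x) false)) PySem.Dict.empty).getD k []
    = PySem.List.sorted ((vdsNormalized s).getD k PySem.Set.empty) (fun x => x) false := by
  have hnd := vdsNormalized_keys_nodup s
  obtain ⟨xs, hmem, hgetD⟩ := vdsNormalized_getD_ofList s hk
  have hfresh := PySem.Dict.items_foldl_insert_fresh (vdsNormalized s).items
    (fun p => p.1) (fun p => PySem.List.sorted p.2 (fun x => x) false) PySem.Dict.empty
    (fun a _ => PySem.Dict.contains_empty _)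
    (by simpa [PySem.Dict.keys] using hnd)
  have hk2 : (k, PySem.List.sorted (PySem.Set.ofList xs) (fun x => x) false) ∈
      ((vdsNormalized s).items.foldl
        (fun od p => od.insert p.1 (PySem.List.sorted p.2 (fun x => x) false)) PySem.Dict.empty).items := by
    rw [hfresh]
    simp only [List.mem_append, List.mem_map]
    exact Or.inr ⟨(k, PySem.Set.ofList xs), hmem, rfl⟩
  have hndo : ((vdsNormalized s).items.foldl
      (fun od p => od.insert p.1 (PySem.List.sorted p.2 (fun x => x) false)) PySem.Dict.empty).keys.Nodup := by
    have h := PySem.Dict.nodup_keys_foldl_insert_key (vdsNormalized s).items (fun p => p.1)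
      (fun _ p => PySem.List.sorted p.2 (fun x => x) false) PySem.Dict.empty
      PySem.Dict.nodup_keys_empty
    simpa using h
  rw [PySem.Dict.getD_of_mem_items _ hk2 hndo, hgetD]

-- sorted intersection as a filter of the sorted left split
theorem sorted_inter_eq_filter (nl nr : List String) (hnl : nl.Nodup) :
    PySem.List.sorted (PySem.Set.inter nl nr) (fun x => x) false
    = (PySem.List.sorted nl (fun x => x) false).filter (fun x => decide (x ∈ nr)) := by
  have h1 := PySem.List.sorted_pairwise (PySem.Set.inter nl nr) (fun x : String => x)
  have h2 := (PySem.List.sorted_pairwise nl (fun x : String => x)).filter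
    (fun x => decide (x ∈ nr))
  have hn1 : (PySem.List.sorted (PySem.Set.inter nl nr) (fun x => x) false).Nodup :=
    (PySem.List.sorted_perm (PySem.Set.inter nl nr) (fun x => x) false).nodup_iff.mpr
      (PySem.Set.nodup_inter nl nr hnl)
  have hn2 : ((PySem.List.sorted nl (fun x => x) false).filter (fun x => decide (x ∈ nr))).Nodup :=
    ((PySem.List.sorted_perm nl (fun x => x) false).nodup_iff.mpr hnl).filter _
  have hperm : (PySem.List.sorted (PySem.Set.inter nl nr) (fun x => x) false).Perm
      ((PySem.List.sorted nl (fun x => x) false).filter (fun x => decide (x ∈ nr))) := by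
    rw [List.perm_ext_iff_of_nodup hn1 hn2]
    intro a
    rw [(PySem.List.sorted_perm (PySem.Set.inter nl nr) (fun x => x) false).mem_iff,
      PySem.Set.mem_inter, List.mem_filter,
      (PySem.List.sorted_perm nl (fun x => x) false).mem_iff]
    simp
  exact List.Perm.eq_of_pairwise (fun a b _ _ hab hba => le_antisymm hab hba) h1 h2 hperm

-- the per-pair overlap, A's way = B's way
theorem overlap_eq (s : List (String × List String)) (left right : String)
    (hl : left ∈ (vdsNormalized s).keys) (hr : right ∈ (vdsNormalized s).keys) :
    PySem.List.sorted
      (((vdsNormalized s).getD left PySem.Set.empty).inter ((vdsNormalized s).getD right PySem.Set.empty))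
      (fun x => x) false
    = (((vdsNormalized s).items.foldl
          (fun od p => od.insert p.1 (PySem.List.sorted p.2 (fun x => x) false)) PySem.Dict.empty).getD left []).filter
        (fun item => ((((vdsNormalized s).items.foldl
            (fun w p => p.2.foldl (fun w item => w.modify item PySem.Set.empty (fun so => so.add p.1)) w)
            PySem.Dict.empty).getD item PySem.Set.empty).contains right)) := by
  obtain ⟨xs, _, hxl⟩ := vdsNormalized_getD_ofList s hl
  rw [ordered_getD s hl]
  rw [sorted_inter_eq_filter _ _ (by rw [hxl]; exact PySem.Set.nodup_ofList xs)]
  apply List.filter_congr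
  intro x _
  rw [Bool.eq_iff_iff, decide_eq_true_eq]
  exact (owners_contains_iff s right x hr).symm

-- ===== VERDICT (by name: the statement is the Claim_ definition above) =====
theorem verify_disjoint_splits_spec : Claim_equal_verify_disjoint_splits := by
  intro s _hdom
  unfold Spec_verify_disjoint_splits verify_disjoint_splits verify_disjoint_splits_alt
  simp only []
  refine congrArg PySem.Dict.items ?_
  rw [vdsEmit_eq_pairFold]
  have hA := enum_slice_foldl_eq_pairFold
    (f := fun left t rep =>
      t.foldl
        (fun rep right_name =>
          let overlap := PySem.List.sorted
            (((vdsNormalized s).getD left PySem.Set.empty).inter ((vdsNormalized s).getD right_name PySem.Set.empty))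
            (fun x => x) false
          if overlap ≠ [] then rep.insert (PySem.Str.join "__" [left, right_name]) overlap else rep)
        rep)
    (vdsNormalized s).keys [] PySem.Dict.empty
  simp only [List.nil_append, List.length_nil, Nat.cast_zero] at hA
  rw [hA]
  apply pairFold_congr
  intro left t r' hl ht
  apply PySem.List.foldl_congr_mem
  intro acc right hrt
  have hr : right ∈ (vdsNormalized s).keys := ht.subset hrt
  simp only [overlap_eq s left right hl hr]
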